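-- pv_equiv track=rewrite | github.com/kalraakshit042/content-engine | layer4_video_production/video_assembler.py | _fix_dangling_words
-- ===== SOURCE A (Python) =====
-- DANGLING_WORDS = {
--     "the", "a", "an", "to", "of", "and", "but", "in",
--     "with", "that", "this", "or", "for", "at", "by", "from", "on",
--     "it", "its", "he", "she", "they", "we", "them", "him", "her", "me", "us",
-- }
--
-- def _fix_dangling_words(chunks: list[str]) -> list[str]:
--     """
--     Post-process chunk list so no chunk ends with a dangling article/preposition.
--     Strategy: pull the first word of the next chunk into the current one.
--     Edge case: if next chunk is a single word, merge the two entirely.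
--     Re-checks after each merge in case pulling a word creates a new dangling end.
--     """
--     result = list(chunks)
--     i = 0
--     while i < len(result) - 1:
--         words = result[i].split()
--         last = words[-1].lower().rstrip(".,!?'\"- ") if words else ""
--         if last in DANGLING_WORDS:
--             next_words = result[i + 1].split()
--             if len(next_words) > 1:
--                 # pull first word of next chunk into current
--                 result[i] = " ".join(words + [next_words[0]])
--                 result[i + 1] = " ".join(next_words[1:])
--                 # re-check same index — new last word might also be dangling
--                 continue
--             else:
--                 # next chunk is a single word — merge entirely
--                 result[i] = " ".join(words + next_words)
--                 result.pop(i + 1)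
--                 continue
--         i += 1
--     return [c for c in result if c.strip()]
-- ===== SOURCE B (Python) =====
-- DANGLING_WORDS = {
--     "the", "a", "an", "to", "of", "and", "but", "in",
--     "with", "that", "this", "or", "for", "at", "by", "from", "on",
--     "it", "its", "he", "she", "they", "we", "them", "him", "her", "me", "us",
-- }
--
--
-- def _fix_dangling_words(chunks: list[str]) -> list[str]:
--     """Single pass over pre-split word lists: words migrate across chunk
--     boundaries with append/pop; no chunk is ever re-split or re-joined
--     mid-loop."""
--
--     def dangling(word: str) -> bool:
--         return word.lower().rstrip(".,!?'\"- ") in DANGLING_WORDS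
--
--     from collections import deque
--     word_lists = [deque(c.split()) for c in chunks]
--     touched = [False] * len(chunks)
--     out = []
--     i = 0
--     n = len(chunks)
--     while i < n:
--         words = word_lists[i]
--         j = i + 1
--         while j < n and words and dangling(words[-1]):
--             donor = word_lists[j]
--             if len(donor) > 1:
--                 words.append(donor.popleft())
--                 touched[j] = True
--             else:  # donor holds at most one word: absorb it wholly
--                 words.extend(donor)
--                 j += 1
--             touched[i] = True
--         if touched[i]:
--             if words:
--                 out.append(" ".join(words))
--         elif chunks[i].strip():
--             out.append(chunks[i])
--         i = j
--     return out
-- ===== Notes on version B (the rewrite author's own statement) =====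
-- stated objective: alternative
-- what changed: B splits every chunk into its word list once and runs a single pass in which words migrate across chunk boundaries by append/popleft on those lists, emitting each finished chunk immediately, instead of A's while-loop that re-splits and re-joins whole chunk strings (and pops from the list) on every merge step; intended as lighter merge steps, but a timing run could not confirm a consistent speed-up.
import Mathlib
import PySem

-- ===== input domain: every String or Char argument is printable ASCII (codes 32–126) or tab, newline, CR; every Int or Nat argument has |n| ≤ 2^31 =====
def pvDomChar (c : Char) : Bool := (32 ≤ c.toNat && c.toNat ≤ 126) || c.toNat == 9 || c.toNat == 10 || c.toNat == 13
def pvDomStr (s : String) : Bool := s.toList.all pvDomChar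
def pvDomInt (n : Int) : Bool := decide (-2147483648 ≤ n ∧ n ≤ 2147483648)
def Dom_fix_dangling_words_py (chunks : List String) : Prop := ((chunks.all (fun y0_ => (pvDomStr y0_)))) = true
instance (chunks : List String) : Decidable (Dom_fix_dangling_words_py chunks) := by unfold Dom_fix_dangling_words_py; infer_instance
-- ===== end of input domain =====

-- B re-implements A in one pass over pre-split word lists (words migrate at chunk
-- boundaries; no chunk is ever re-split or re-joined mid-loop) — objective: alternative.

-- Shared module-level context (DANGLING_WORDS and the dangling test both sources use verbatim)
def pvDanglingWords : PySem.Set String := PySem.Set.ofList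
  ["the", "a", "an", "to", "of", "and", "but", "in",
   "with", "that", "this", "or", "for", "at", "by", "from", "on",
   "it", "its", "he", "she", "they", "we", "them", "him", "her", "me", "us"]

-- Python w.rstrip(".,!?'\"- "): drop TRAILING characters of the given set (hand port, exact:
-- PySem.Str.stripChars strips both ends, Python's rstrip only the right end)
def pvRstripPunct (s : String) : String :=
  String.ofList ((s.toList.reverse.dropWhile (fun c => ".,!?'- \"".toList.contains c)).reverse)

-- ---- split/join word-list facts (cited by pvFixLoop's decreasing_by, reused by the proofs) ----

theorem pvGoNil (cur : List Char) (acc : List (List Char)) : PySem.Chars.split₀.go [] cur acc =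
    (if cur.isEmpty then acc.reverse else (cur.reverse :: acc).reverse) := by
  simp [PySem.Chars.split₀.go]

theorem pvGoCons (c : Char) (rest : List Char) (cur : List Char) (acc : List (List Char)) :
    PySem.Chars.split₀.go (c :: rest) cur acc =
    (if PySem.Chars.isspace c then (if cur.isEmpty then PySem.Chars.split₀.go rest [] acc
       else PySem.Chars.split₀.go rest [] (cur.reverse :: acc))
     else PySem.Chars.split₀.go rest (c :: cur) acc) := by
  rw [PySem.Chars.split₀.go]

theorem pvGoAcc (s : List Char) : ∀ (cur : List Char) (acc : List (List Char)),
    PySem.Chars.split₀.go s cur acc = acc.reverse ++ PySem.Chars.split₀.go s cur [] := by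
  induction s with
  | nil => intro cur acc; rw [pvGoNil, pvGoNil]; split_ifs <;> simp
  | cons c rest ih =>
    intro cur acc
    rw [pvGoCons, pvGoCons]
    split_ifs with h1 h2
    · exact ih [] acc
    · rw [ih [] (cur.reverse :: acc), ih [] [cur.reverse]]; simp
    · exact ih (c :: cur) acc

theorem pvGoWord (w : List Char) (hw : ∀ c ∈ w, PySem.Chars.isspace c = false) :
    ∀ (rest cur : List Char) (acc : List (List Char)),
    PySem.Chars.split₀.go (w ++ rest) cur acc = PySem.Chars.split₀.go rest (w.reverse ++ cur) acc := by
  induction w with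
  | nil => simp
  | cons c w' ih =>
    intro rest cur acc
    have hc : PySem.Chars.isspace c = false := hw c (by simp)
    rw [List.cons_append, pvGoCons, hc]
    simp only [if_neg (by simp : ¬ (false = true))]
    rw [ih (fun c hc => hw c (by simp [hc])) rest (c :: cur) acc]
    simp

theorem pvSplitWordCons (w t : List Char) (hne : w ≠ [])
    (hw : ∀ c ∈ w, PySem.Chars.isspace c = false) :
    PySem.Chars.split₀ (w ++ ' ' :: t) = w :: PySem.Chars.split₀ t := by
  unfold PySem.Chars.split₀
  rw [pvGoWord w hw, pvGoCons]
  have hsp : PySem.Chars.isspace ' ' = true := by decide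
  have hcur : (w.reverse ++ ([] : List Char)).isEmpty = false := by simp [hne]
  rw [hsp, if_pos rfl, hcur]
  simp only [Bool.false_eq_true, if_false]
  rw [pvGoAcc]
  simp

theorem pvSplitWord (w : List Char) (hne : w ≠ [])
    (hw : ∀ c ∈ w, PySem.Chars.isspace c = false) :
    PySem.Chars.split₀ w = [w] := by
  unfold PySem.Chars.split₀
  rw [show w = w ++ [] by simp, pvGoWord w hw, pvGoNil]
  simp [List.isEmpty_iff, hne]

theorem pvSplitJoinChars (ws : List (List Char))
    (h : ∀ w ∈ ws, w ≠ [] ∧ ∀ c ∈ w, PySem.Chars.isspace c = false) :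
    PySem.Chars.split₀ (PySem.Chars.join [' '] ws) = ws := by
  induction ws with
  | nil => rw [PySem.Chars.join_nil]; decide
  | cons a l ih =>
    match l with
    | [] =>
      rw [PySem.Chars.join_singleton]
      exact pvSplitWord a (h a (by simp)).1 (h a (by simp)).2
    | b :: l' =>
      rw [PySem.Chars.join_cons_cons]
      have := pvSplitWordCons a (PySem.Chars.join [' '] (b :: l')) (h a (by simp)).1 (h a (by simp)).2
      rw [List.append_assoc, List.singleton_append, this,
        ih (fun w hw => h w (by simp [hw]))]

theorem pvGoWordlist (s : List Char) : ∀ (cur : List Char) (acc : List (List Char)),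
    (∀ c ∈ cur, PySem.Chars.isspace c = false) →
    (∀ w ∈ acc, w ≠ [] ∧ ∀ c ∈ w, PySem.Chars.isspace c = false) →
    ∀ w ∈ PySem.Chars.split₀.go s cur acc, w ≠ [] ∧ ∀ c ∈ w, PySem.Chars.isspace c = false := by
  induction s with
  | nil =>
    intro cur acc hcur hacc w hw
    rw [pvGoNil] at hw
    split_ifs at hw with h
    · exact hacc w (by simpa using hw)
    · rw [List.mem_reverse] at hw
      rcases List.mem_cons.mp hw with hv | hv
      · subst hv
        refine ⟨by simpa [List.isEmpty_iff] using h, ?_⟩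
        intro c hc; exact hcur c (by simpa using hc)
      · exact hacc w hv
  | cons c rest ih =>
    intro cur acc hcur hacc w hw
    rw [pvGoCons] at hw
    split_ifs at hw with h1 h2
    · exact ih [] acc (by simp) hacc w hw
    · refine ih [] (cur.reverse :: acc) (by simp) ?_ w hw
      intro v hv
      rcases List.mem_cons.mp hv with hv2 | hv2
      · subst hv2
        refine ⟨by simpa [List.isEmpty_iff] using h2, ?_⟩
        intro d hd; exact hcur d (by simpa using hd)
      · exact hacc v hv2
    · refine ih (c :: cur) acc ?_ hacc w hw
      intro d hd
      rcases List.mem_cons.mp hd with hd2 | hd2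
      · subst hd2; simpa using h1
      · exact hcur d hd2

-- every piece Python's s.split() produces is nonempty and whitespace-free
theorem pvSplitWordlistChars (s : List Char) :
    ∀ w ∈ PySem.Chars.split₀ s, w ≠ [] ∧ ∀ c ∈ w, PySem.Chars.isspace c = false :=
  pvGoWordlist s [] [] (by simp) (by simp)

-- word lists on the String level
def pvWordList (ws : List String) : Prop :=
  ∀ w ∈ ws, w.toList ≠ [] ∧ ∀ c ∈ w.toList, PySem.Chars.isspace c = false

theorem pvSplitWordlist (s : String) : pvWordList (PySem.Str.split₀ s) := by
  intro w hw
  unfold PySem.Str.split₀ at hw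
  rcases List.mem_map.mp hw with ⟨v, hv, rfl⟩
  have := pvSplitWordlistChars s.toList v hv
  simpa using this

theorem pvWordList_drop {ws : List String} (h : pvWordList ws) (n : Nat) :
    pvWordList (ws.drop n) := fun w hw => h w (List.mem_of_mem_drop hw)

-- " ".join of a word list re-splits to exactly that word list
theorem pvSplitJoin (ws : List String) (h : pvWordList ws) :
    PySem.Str.split₀ (PySem.Str.join " " ws) = ws := by
  unfold PySem.Str.split₀
  rw [PySem.Str.toList_join]
  have hsep : (" " : String).toList = [' '] := by decide
  rw [hsep, pvSplitJoinChars (ws.map String.toList) (by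
    intro w hw
    rcases List.mem_map.mp hw with ⟨v, hv, rfl⟩
    exact h v hv)]
  simp [Function.comp_def, String.ofList_toList]

-- ===== PORT A =====
-- A's while loop: index i over the mutable chunk list; re-splits result[i] each pass,
-- pulls the first word of the next chunk (or merges a ≤1-word next chunk wholly, popping it)
def pvFixLoop (result : List String) (i : Nat) : List String :=
  if _h : i < result.length - 1 then
    let words := PySem.Str.split₀ (result.getD i "")  -- index i in range under the guard
    let last : String := match words.getLast? with    -- words[-1] if words else ""
      | some w => pvRstripPunct (PySem.Str.lower w)
      | none => ""
    if pvDanglingWords.contains last then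
      let next_words := PySem.Str.split₀ (result.getD (i+1) "")
      if next_words.length > 1 then
        pvFixLoop ((result.set i (PySem.Str.join " " (words ++ [next_words.headD ""]))).set
          (i+1) (PySem.Str.join " " (next_words.drop 1))) i
      else
        -- result.pop(i+1) at the in-range index i+1 is eraseIdx
        pvFixLoop ((result.set i (PySem.Str.join " " (words ++ next_words))).eraseIdx (i+1)) i
    else
      pvFixLoop result (i+1)
  else result
termination_by (result.length - i, ((result.drop (i+1)).map (fun s => (PySem.Str.split₀ s).length)).sum)
decreasing_by
  · -- pulled one word from chunk i+1: same length, same i, fewer words right of i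
    simp_wf
    have h2 : i + 1 < result.length := by omega
    have hlt : 1 < (PySem.Str.split₀ (result.getD (i + 1) "")).length := by assumption
    rw [List.getD_eq_getElem _ _ h2] at hlt
    refine Prod.Lex.right' _ (by simp) ?_
    rw [List.drop_eq_getElem_cons (by simpa using h2),
        List.getElem_set_self (by simpa using h2), List.drop_set_of_lt (by omega),
        List.drop_set_of_lt (by omega)]
    have h3 : i + 1 < (List.map (fun s => (PySem.Str.split₀ s).length) result).length := by
      simpa using h2
    rw [List.getElem?_eq_getElem h2, Option.getD_some, List.drop_eq_getElem_cons h3,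
      List.getElem_map, List.sum_cons, List.sum_cons,
      pvSplitJoin _ (by rw [← List.drop_one]; exact pvWordList_drop (pvSplitWordlist _) 1),
      List.length_tail]
    omega
  · -- merged chunk i+1 away: the list got shorter, i unchanged
    simp_wf
    apply Prod.Lex.left
    have h2 : i + 1 < result.length := by omega
    simp only [List.length_eraseIdx, List.length_set]
    rw [if_pos (by simpa using h2)]
    omega
  · -- moved on: i grew
    simp_wf
    apply Prod.Lex.left
    omega

def fix_dangling_words_py (chunks : List String) : List String :=
  (pvFixLoop chunks 0).filter (fun c => !(PySem.Str.strip c == ""))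

-- ===== PORT B =====
-- helper 'dangling' of Source B
def pvDangling (w : String) : Bool :=
  pvDanglingWords.contains (pvRstripPunct (PySem.Str.lower w))

-- the per-cell emit at the end of Source B's outer loop body
def pvEmit (orig : String) (words : List String) (touched : Bool) : List String :=
  if touched then (if words = [] then [] else [PySem.Str.join " " words])
  else if PySem.Str.strip orig = "" then [] else [orig]

-- Source B's loops: the current cell (orig, words, touched) absorbs words from the cells
-- after it (the suffix 'rest' plays the j-pointer) and is emitted; then the next cell runs
def pvGo (orig : String) (words : List String) (touched : Bool)
    (rest : List (String × List String × Bool)) : List String :=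
  match rest with
  | [] => pvEmit orig words touched
  | (dorig, dwords, dtouched) :: rest' =>
    if (match words.getLast? with | some w => pvDangling w | none => false) then
      if dwords.length > 1 then
        pvGo orig (words ++ [dwords.headD ""]) true ((dorig, dwords.drop 1, true) :: rest')
      else
        pvGo orig (words ++ dwords) true rest'
    else
      pvEmit orig words touched ++ pvGo dorig dwords dtouched rest'
termination_by (rest.map (fun c => c.2.1.length + 1)).sum
decreasing_by
  · simp only [List.map_cons, List.sum_cons, List.length_drop]; omega
  · simp only [List.map_cons, List.sum_cons]; omega
  · simp only [List.map_cons, List.sum_cons]; omega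

def fix_dangling_words_py_alt (chunks : List String) : List String :=
  match chunks.map (fun c => (c, PySem.Str.split₀ c, false)) with
  | [] => []
  | (o, w, t) :: rest => pvGo o w t rest

-- ===== PRECONDITION & SPEC =====
def Spec_fix_dangling_words_py (chunks : List String) (out : List String) : Prop := out = fix_dangling_words_py_alt chunks
instance (chunks : List String) (out : List String) : Decidable (Spec_fix_dangling_words_py chunks out) := by unfold Spec_fix_dangling_words_py; infer_instance

-- ===== CLAIM (what is proved, stated in full; the proofs are below) =====
def Claim_equal_fix_dangling_words_py : Prop := ∀ (chunks : List String), Dom_fix_dangling_words_py chunks → Spec_fix_dangling_words_py chunks (fix_dangling_words_py chunks)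

-- ===== LEMMAS AND PROOFS =====

theorem pvWordList_append {ws vs : List String} (h1 : pvWordList ws) (h2 : pvWordList vs) :
    pvWordList (ws ++ vs) := by
  intro w hw; rcases List.mem_append.mp hw with h | h
  · exact h1 w h
  · exact h2 w h

-- s.split() of an all-whitespace string is empty
theorem pvGoAllspace (s : List Char) (h : ∀ c ∈ s, PySem.Chars.isspace c = true) :
    ∀ acc, PySem.Chars.split₀.go s [] acc = acc.reverse := by
  induction s with
  | nil => intro acc; rw [pvGoNil]; simp
  | cons c rest ih =>
    intro acc
    rw [pvGoCons, h c (by simp)]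
    simp only [List.isEmpty_nil, if_true]
    exact ih (fun d hd => h d (by simp [hd])) acc

theorem pvSplitAllspace (s : List Char) (h : ∀ c ∈ s, PySem.Chars.isspace c = true) :
    PySem.Chars.split₀ s = [] := by
  unfold PySem.Chars.split₀; simpa using pvGoAllspace s h []

theorem pvStripNil (s : List Char) :
    PySem.Chars.strip s = [] ↔ ∀ c ∈ s, PySem.Chars.isspace c = true := by
  unfold PySem.Chars.strip PySem.Chars.rstrip PySem.Chars.lstrip
  constructor
  · intro h c hc
    rw [List.reverse_eq_nil_iff, List.dropWhile_eq_nil_iff] at h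
    have h2 : ∀ d ∈ s.dropWhile PySem.Chars.isspace, PySem.Chars.isspace d = true := by
      intro d hd; exact h d (by simpa using hd)
    have hs := List.takeWhile_append_dropWhile (p := PySem.Chars.isspace) (l := s)
    rw [← hs] at hc
    rcases List.mem_append.mp hc with hc2 | hc2
    · exact List.mem_takeWhile_imp hc2
    · exact h2 c hc2
  · intro h
    have h1 : s.dropWhile PySem.Chars.isspace = [] := List.dropWhile_eq_nil_iff.mpr h
    simp [h1]

-- truthiness of " ".join(ws).strip() is just ws ≠ []
theorem pvStripJoinNil (ws : List String) (h : pvWordList ws) :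
    PySem.Str.strip (PySem.Str.join " " ws) = "" ↔ ws = [] := by
  constructor
  · intro hs
    by_contra hne
    have hsp : ∀ c ∈ (PySem.Str.join " " ws).toList, PySem.Chars.isspace c = true := by
      rw [← pvStripNil]
      have := congrArg String.toList hs
      simpa [PySem.Str.strip] using this
    have h0 : PySem.Chars.split₀ ((PySem.Str.join " " ws).toList) = [] := pvSplitAllspace _ hsp
    have h1 := pvSplitJoin ws h
    rw [PySem.Str.split₀, h0] at h1
    exact hne (by simpa using h1.symm)
  · rintro rfl; decide

theorem pvEmit_join (ws : List String) (h : pvWordList ws) (o : String) :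
    pvEmit (PySem.Str.join " " ws) ws false = pvEmit o ws true := by
  unfold pvEmit
  simp only [Bool.false_eq_true, if_false, if_true]
  by_cases hws : ws = []
  · subst hws
    rw [if_pos ((pvStripJoinNil [] (by intro w hw; cases hw)).mpr rfl), if_pos rfl]
  · rw [if_neg hws, if_neg (fun hc => hws ((pvStripJoinNil ws h).mp hc))]

theorem pvEmit_true (o o' : String) (w : List String) : pvEmit o w true = pvEmit o' w true := by
  unfold pvEmit; simp

theorem pvEmit_false (o : String) (w : List String) :
    pvEmit o w false = List.filter (fun c => !(PySem.Str.strip c == "")) [o] := by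
  unfold pvEmit
  by_cases h : PySem.Str.strip o = "" <;> simp [h]

-- A's membership test on the cleaned last word equals B's guard
theorem pvCond_eq (words : List String) :
    (pvDanglingWords.contains (match words.getLast? with
       | some w => pvRstripPunct (PySem.Str.lower w) | none => "")) =
    (match words.getLast? with | some w => pvDangling w | none => false) := by
  cases words.getLast? with
  | none => decide
  | some w => rfl

theorem pvAlt_cons (x : String) (l : List String) :
    fix_dangling_words_py_alt (x :: l) = pvGo x (PySem.Str.split₀ x) false
      (l.map (fun c => (c, PySem.Str.split₀ c, false))) := rfl

theorem pvGo_nil (o : String) (w : List String) (t : Bool) : pvGo o w t [] = pvEmit o w t := by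
  rw [pvGo]

theorem pvGo_cons (o : String) (w : List String) (t : Bool) (dorig : String)
    (dwords : List String) (dtouched : Bool) (rest' : List (String × List String × Bool)) :
    pvGo o w t ((dorig, dwords, dtouched) :: rest') =
    (if (match w.getLast? with | some x => pvDangling x | none => false) then
      (if dwords.length > 1 then
        pvGo o (w ++ [dwords.headD ""]) true ((dorig, dwords.drop 1, true) :: rest')
       else pvGo o (w ++ dwords) true rest')
     else pvEmit o w t ++ pvGo dorig dwords dtouched rest') := by
  rw [pvGo]

-- cells that hold the same words and emit the same chunk are interchangeable
def pvCellR (c c' : String × List String × Bool) : Prop :=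
  c.2.1 = c'.2.1 ∧ pvEmit c.1 c.2.1 c.2.2 = pvEmit c'.1 c'.2.1 c'.2.2

theorem pvGo_congr (o : String) (w : List String) (t : Bool)
    (rest : List (String × List String × Bool)) :
    ∀ (o' : String) (t' : Bool) (rest' : List (String × List String × Bool)),
      pvEmit o w t = pvEmit o' w t' →
      List.Forall₂ pvCellR rest rest' →
      pvGo o w t rest = pvGo o' w t' rest' := by
  fun_induction pvGo o w t rest with
  | case1 o w t =>
    intro o' t' rest' he hf
    cases hf
    conv_rhs => rw [pvGo_nil]
    exact he
  | case2 o w t dorig dwords dtouched rest₀ hcond hlen ih =>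
    intro o' t' rest' he hf
    cases hf with
    | cons hc hf' =>
      rename_i b rest₂
      rcases b with ⟨bo, bw, bt⟩
      rcases hc with ⟨hw, hce⟩
      simp only at hw
      subst hw
      conv_rhs => rw [pvGo_cons]
      rw [if_pos hcond, if_pos hlen]
      exact ih o' true ((bo, dwords.drop 1, true) :: rest₂) (pvEmit_true _ _ _)
        (List.Forall₂.cons ⟨rfl, pvEmit_true dorig bo (dwords.drop 1)⟩ hf')
  | case3 o w t dorig dwords dtouched rest₀ hcond hlen ih =>
    intro o' t' rest' he hf
    cases hf with
    | cons hc hf' =>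
      rename_i b rest₂
      rcases b with ⟨bo, bw, bt⟩
      rcases hc with ⟨hw, hce⟩
      simp only at hw
      subst hw
      conv_rhs => rw [pvGo_cons]
      rw [if_pos hcond, if_neg hlen]
      exact ih o' true rest₂ (pvEmit_true _ _ _) hf'
  | case4 o w t dorig dwords dtouched rest₀ hcond ih =>
    intro o' t' rest' he hf
    cases hf with
    | cons hc hf' =>
      rename_i b rest₂
      rcases b with ⟨bo, bw, bt⟩
      rcases hc with ⟨hw, hce⟩
      simp only at hw
      subst hw
      conv_rhs => rw [pvGo_cons]
      rw [if_neg hcond, he]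
      rw [ih bo bt rest₂ hce hf']

theorem pvDropGetD (l : List String) (i : Nat) (h : i < l.length) :
    l.drop i = l.getD i "" :: l.drop (i+1) := by
  rw [List.getD_eq_getElem _ _ h]; exact List.drop_eq_getElem_cons h

theorem pvDropSetSet (l : List String) (i : Nat) (x y : String) (h : i + 1 < l.length) :
    ((l.set i x).set (i+1) y).drop i = x :: y :: l.drop (i+2) := by
  rw [List.drop_eq_getElem_cons (by simp; omega),
    List.drop_eq_getElem_cons (by simp; omega),
    show i+1+1 = i+2 from rfl, List.drop_set_of_lt (by omega), List.drop_set_of_lt (by omega)]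
  simp

theorem pvDropSetErase (l : List String) (i : Nat) (x : String) (h : i + 1 < l.length) :
    ((l.set i x).eraseIdx (i+1)).drop i = x :: l.drop (i+2) := by
  rw [List.eraseIdx_eq_take_drop_succ,
    List.drop_append_of_le_length (by simp [List.length_take]; omega),
    ← List.take_drop, List.drop_eq_getElem_cons (by simp; omega),
    List.getElem_set_self (by simp; omega),
    show i+1+1 = i+2 from rfl, List.drop_set_of_lt (by omega),
    List.drop_set_of_lt (by omega)]
  simp

theorem pvTakeSet (l : List String) (i j : Nat) (x : String) (h : i ≤ j) :
    (l.set j x).take i = l.take i := List.take_set_of_le h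

theorem pvTakeSetErase (l : List String) (i : Nat) (x : String) (h : i + 1 < l.length) :
    ((l.set i x).eraseIdx (i+1)).take i = l.take i := by
  rw [List.eraseIdx_eq_take_drop_succ,
    List.take_append_of_le_length (by simp [List.length_take]; omega),
    List.take_take, Nat.min_eq_left (by omega), List.take_set_of_le (by omega)]

theorem pvMain (result : List String) (i : Nat) :
    i ≤ result.length →
    (pvFixLoop result i).filter (fun c => !(PySem.Str.strip c == "")) =
    (result.take i).filter (fun c => !(PySem.Str.strip c == "")) ++
      fix_dangling_words_py_alt (result.drop i) := by
  fun_induction pvFixLoop result i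
  case case1 result i _h words last hcond next_words hlen ih =>
    -- A pulled next_words[0] into chunk i
    intro hi
    have hw : words = PySem.Str.split₀ (result.getD i "") := rfl
    have hnw : next_words = PySem.Str.split₀ (result.getD (i+1) "") := rfl
    have h2 : i + 1 < result.length := by omega
    have hnwl : pvWordList next_words := hnw ▸ pvSplitWordlist _
    have hhd : pvWordList (words ++ [next_words.headD ""]) := by
      refine pvWordList_append (hw ▸ pvSplitWordlist _) ?_
      intro v hv
      rcases List.mem_singleton.mp hv with rfl
      refine hnwl _ ?_
      match next_words, hlen with
      | x :: _, _ => simp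
    rw [ih (by simp; omega), pvTakeSet _ i (i+1) _ (by omega), pvTakeSet _ i i _ (le_refl i),
      pvDropSetSet _ _ _ _ h2, pvAlt_cons]
    simp only [List.map_cons]
    rw [pvSplitJoin _ hhd, pvSplitJoin _ (pvWordList_drop hnwl 1)]
    conv_rhs => rw [pvDropGetD result i (by omega), pvDropGetD result (i+1) h2, pvAlt_cons]
    simp only [List.map_cons]
    rw [← hw, ← hnw]
    have hB : (match words.getLast? with | some x => pvDangling x | none => false) = true := by
      rw [← pvCond_eq]; exact hcond
    conv_rhs => rw [pvGo_cons]
    rw [hB, if_pos rfl, if_pos hlen]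
    congr 1
    exact pvGo_congr _ _ _ _ _ _ _ (pvEmit_join _ hhd _)
      (List.Forall₂.cons ⟨rfl, pvEmit_join _ (pvWordList_drop hnwl 1) _⟩
        (List.forall₂_same.mpr (fun c _ => ⟨rfl, rfl⟩)))
  case case2 result i _h words last hcond next_words hlen ih =>
    -- next chunk had at most one word: A merged it wholly and popped it
    intro hi
    have hw : words = PySem.Str.split₀ (result.getD i "") := rfl
    have hnw : next_words = PySem.Str.split₀ (result.getD (i+1) "") := rfl
    have h2 : i + 1 < result.length := by omega
    have hm : pvWordList (words ++ next_words) :=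
      pvWordList_append (hw ▸ pvSplitWordlist _) (hnw ▸ pvSplitWordlist _)
    rw [ih (by simp [List.length_eraseIdx, List.length_set, h2]; omega), pvTakeSetErase _ _ _ h2,
      pvDropSetErase _ _ _ h2, pvAlt_cons]
    rw [pvSplitJoin _ hm]
    conv_rhs => rw [pvDropGetD result i (by omega), pvDropGetD result (i+1) h2, pvAlt_cons]
    simp only [List.map_cons]
    rw [← hw, ← hnw]
    have hB : (match words.getLast? with | some x => pvDangling x | none => false) = true := by
      rw [← pvCond_eq]; exact hcond
    conv_rhs => rw [pvGo_cons]
    rw [hB, if_pos rfl, if_neg hlen]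
    congr 1
    exact pvGo_congr _ _ _ _ _ _ _ (pvEmit_join _ hm _)
      (List.forall₂_same.mpr (fun c _ => ⟨rfl, rfl⟩))
  case case3 result i _h words last hcond ih =>
    -- chunk i does not end dangling: A moves on, B emits the cell
    intro hi
    have hw : words = PySem.Str.split₀ (result.getD i "") := rfl
    have h2 : i + 1 < result.length := by omega
    rw [ih (by omega)]
    have hB : (match words.getLast? with | some x => pvDangling x | none => false) = false := by
      rw [← pvCond_eq]; exact (Bool.not_eq_true _).mp hcond
    conv_rhs => rw [pvDropGetD result i (by omega), pvDropGetD result (i+1) h2, pvAlt_cons]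
    simp only [List.map_cons]
    conv_rhs => rw [← hw, pvGo_cons]
    simp only [hB, Bool.false_eq_true, if_false]
    rw [List.take_succ_eq_append_getElem (by omega), List.filter_append,
      pvEmit_false, List.getD_eq_getElem _ _ (by omega : i < result.length)]
    rw [pvDropGetD result (i+1) h2, pvAlt_cons]
    simp only [List.append_assoc]
  case case4 result i _h =>
    -- loop exit: at most one chunk remains to the right of i
    intro hi
    by_cases hil : result.length ≤ i
    · rw [List.take_of_length_le hil, List.drop_of_length_le hil,
        show fix_dangling_words_py_alt [] = [] from rfl, List.append_nil]
    · have hlen : result.length = i + 1 := by omega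
      rw [pvDropGetD result i (by omega), List.drop_of_length_le (by omega), pvAlt_cons]
      simp only [List.map_nil]
      rw [pvGo_nil, pvEmit_false, List.getD_eq_getElem _ _ (by omega : i < result.length),
        ← List.filter_append, ← List.take_succ_eq_append_getElem (by omega), ← hlen,
        List.take_length]

-- ===== VERDICT (by name: the statement is the Claim_ definition above) =====
theorem fix_dangling_words_py_spec : Claim_equal_fix_dangling_words_py := by
  intro chunks _
  unfold Spec_fix_dangling_words_py fix_dangling_words_py
  simpa using pvMain chunks 0 (by omega)
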